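-- pv_equiv track=rewrite | github.com/linliyong/check_reduction | compute_reduction.py | sim_disset
-- ===== SOURCE A (Python) =====
-- def inclusion(sub1, sub2):
--     for i in range(0, len(sub1)):
--         if not(sub1[i] in sub2):
--             return 0
--     return 1
--
-- def check_depend(sub, distr):
--     flag=0
--     for i in range(0, len(distr)):
--         if inclusion(sub,distr[i]):
--             flag=1
--             break
--     return flag
--
-- def check_small(distr1, distr2):
--     distr1new=distr1
--     flag=1
--     while len(distr1new)>0:
--         if not(check_depend(distr1new[0],distr2)):
--             flag=0
--             break
--         distr1new=distr1new[1:]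
--     return flag
--
-- def sim_disset(disset):
--     if len(disset)==0:
--         return disset
--     else:
--         disset_prime=[disset[0]]
--         disset=disset[1:]
--         while len(disset)>0:
--             flag=1
--             val=[]
--             for i in range (0, len(disset_prime)):
--                 if check_small(disset_prime[i],disset[0]):
--                     flag=0
--                     break
--                 elif check_small(disset[0],disset_prime[i]):
--                     val.append(disset_prime[i])
--             if flag==1:
--                 disset_prime=disset_prime+[disset[0]]
--             disset=disset[1:]
--             if not(val==[]):
--                 for i in range (0, len(val)):
--                     disset_prime.remove(val[i])
--         return disset_prime
-- ===== SOURCE B (Python) =====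
-- def sim_disset(disset):
--     def le(x, y):
--         return all(any(all(v in d for v in s) for d in y) for s in x)
--     out = []
--     pre = []
--     for e in disset:
--         dominated = any(le(o, e) and not le(e, o) for o in disset)
--         duplicate = any(le(o, e) and le(e, o) for o in pre)
--         if not (dominated or duplicate):
--             out.append(e)
--         pre.append(e)
--     return out
-- ===== Notes on version B (the rewrite author's own statement) =====
-- stated objective: simpler
-- what changed: A grows a result set incrementally, pruning dominated members with break/flag bookkeeping and list.remove; B is a single independent filtering pass that keeps an element iff no element of the input is strictly below it and no earlier element is equivalent to it.
import Mathlib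
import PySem

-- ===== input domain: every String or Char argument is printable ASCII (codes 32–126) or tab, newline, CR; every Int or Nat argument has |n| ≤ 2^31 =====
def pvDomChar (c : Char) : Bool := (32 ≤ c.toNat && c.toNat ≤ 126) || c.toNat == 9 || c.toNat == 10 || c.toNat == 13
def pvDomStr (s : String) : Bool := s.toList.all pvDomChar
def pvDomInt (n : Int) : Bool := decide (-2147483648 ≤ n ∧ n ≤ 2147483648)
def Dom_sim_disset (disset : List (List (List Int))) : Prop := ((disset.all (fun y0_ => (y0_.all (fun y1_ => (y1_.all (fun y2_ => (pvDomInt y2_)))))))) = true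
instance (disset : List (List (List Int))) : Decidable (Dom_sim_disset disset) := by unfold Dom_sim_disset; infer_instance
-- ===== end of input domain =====

-- B replaces A's incremental add-and-prune loop by a single independent filtering pass
-- (keep an element iff nothing dominates it strictly and no earlier element is equivalent); objective: simpler.


-- ===== PORT A =====
def inclusion (sub1 sub2 : List Int) : Int :=
  match sub1 with
  | [] => 1
  | x :: xs => if x ∈ sub2 then inclusion xs sub2 else 0

def check_depend (sub : List Int) (distr : List (List Int)) : Int :=
  match distr with
  | [] => 0
  | d :: ds => if inclusion sub d ≠ 0 then 1 else check_depend sub ds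

def check_small (distr1 distr2 : List (List Int)) : Int :=
  match distr1 with
  | [] => 1
  | s :: rest => if check_depend s distr2 = 0 then 0 else check_small rest distr2

-- the for-loop over disset_prime that sets flag and accumulates val (break = early return)
def scanPrime (e : List (List Int)) :
    List (List (List Int)) → List (List (List Int)) → Bool × List (List (List Int))
  | [], val => (true, val)
  | p :: ps, val =>
    if check_small p e ≠ 0 then (false, val)
    else if check_small e p ≠ 0 then scanPrime e ps (val ++ [p])
    else scanPrime e ps val

-- Python list.remove: removes the first occurrence; exact wherever Python returns
-- (Python raises ValueError when absent — unreachable in sim_disset, proved by the equivalence below).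
def removeFirst (l : List (List (List Int))) (x : List (List Int)) : List (List (List Int)) :=
  match l with
  | [] => []
  | y :: ys => if y = x then ys else y :: removeFirst ys x

def simLoop : List (List (List Int)) → List (List (List Int)) → List (List (List Int))
  | [], prime => prime
  | e :: rest, prime =>
    let r := scanPrime e prime []
    let prime1 := if r.1 then prime ++ [e] else prime
    let prime2 := r.2.foldl removeFirst prime1
    simLoop rest prime2

def sim_disset (disset : List (List (List Int))) : List (List (List Int)) :=
  match disset with
  | [] => disset
  | d0 :: rest => simLoop rest [d0]

-- ===== PORT B =====
def subsetB (a b : List Int) : Bool := a.all (fun v => decide (v ∈ b))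

def leB (x y : List (List Int)) : Bool := x.all (fun s => y.any (fun d => subsetB s d))

def altGo (all : List (List (List Int))) :
    List (List (List Int)) → List (List (List Int)) → List (List (List Int)) → List (List (List Int))
  | [], out, _pre => out
  | e :: rest, out, pre =>
    let dominated := all.any (fun o => leB o e && !leB e o)
    let duplicate := pre.any (fun o => leB o e && leB e o)
    altGo all rest (if dominated || duplicate then out else out ++ [e]) (pre ++ [e])

def sim_disset_alt (disset : List (List (List Int))) : List (List (List Int)) :=
  altGo disset disset [] []

-- ===== PRECONDITION & SPEC =====
def Spec_sim_disset (disset : List (List (List Int))) (out : List (List (List Int))) : Prop := out = sim_disset_alt disset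
instance (disset : List (List (List Int))) (out : List (List (List Int))) : Decidable (Spec_sim_disset disset out) := by unfold Spec_sim_disset; infer_instance

-- ===== CLAIM (what is proved, stated in full; the proofs are below) =====
def Claim_equal_sim_disset : Prop := ∀ (disset : List (List (List Int))), Dom_sim_disset disset → Spec_sim_disset disset (sim_disset disset)

-- ===== LEMMAS AND PROOFS =====

-- B's loop with the output accumulator abstracted away
def filtF (all : List (List (List Int))) :
    List (List (List Int)) → List (List (List Int)) → List (List (List Int))
  | [], _pre => []
  | e :: rest, pre =>
    (if all.any (fun o => leB o e && !leB e o) || pre.any (fun o => leB o e && leB e o)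
     then [] else [e]) ++ filtF all rest (pre ++ [e])

def Fp (seen : List (List (List Int))) : List (List (List Int)) := filtF seen seen []

def Dominates (seen : List (List (List Int))) : Prop :=
  ∀ s ∈ seen, ∃ p ∈ Fp seen, leB p s = true

lemma subsetB_refl (a : List Int) : subsetB a a = true := by
  simp [subsetB, List.all_eq_true]

lemma subsetB_trans {a b c : List Int} (h1 : subsetB a b = true) (h2 : subsetB b c = true) :
    subsetB a c = true := by
  simp only [subsetB, List.all_eq_true, decide_eq_true_eq] at *
  exact fun v hv => h2 v (h1 v hv)

lemma leB_refl (x : List (List Int)) : leB x x = true := by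
  simp only [leB, List.all_eq_true, List.any_eq_true]
  exact fun s hs => ⟨s, hs, subsetB_refl s⟩

lemma leB_trans {x y z : List (List Int)} (h1 : leB x y = true) (h2 : leB y z = true) :
    leB x z = true := by
  simp only [leB, List.all_eq_true, List.any_eq_true] at *
  intro s hs
  obtain ⟨d, hd, hsd⟩ := h1 s hs
  obtain ⟨d', hd', hdd'⟩ := h2 d hd
  exact ⟨d', hd', subsetB_trans hsd hdd'⟩

lemma inclusion_eq (a b : List Int) : inclusion a b = if subsetB a b then 1 else 0 := by
  induction a with
  | nil => simp [inclusion, subsetB]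
  | cons x xs ih =>
    simp only [inclusion, subsetB, List.all_cons]
    by_cases hx : x ∈ b
    · simp [hx, ih, subsetB]
    · simp [hx]

lemma check_depend_eq (s : List Int) (distr : List (List Int)) :
    check_depend s distr = if distr.any (fun d => subsetB s d) then 1 else 0 := by
  induction distr with
  | nil => simp [check_depend]
  | cons d ds ih =>
    simp only [check_depend, inclusion_eq, List.any_cons]
    by_cases hd : subsetB s d = true
    · simp [hd]
    · simp only [Bool.not_eq_true] at hd
      simp [hd, ih]

lemma check_small_eq (x y : List (List Int)) :
    check_small x y = if leB x y then 1 else 0 := by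
  induction x with
  | nil => simp [check_small, leB]
  | cons s rest ih =>
    simp only [check_small, check_depend_eq, leB, List.all_cons]
    by_cases hs : y.any (fun d => subsetB s d) = true
    · simp [hs, ih, leB]
    · simp only [Bool.not_eq_true] at hs
      simp [hs]

lemma altGo_out (all : List (List (List Int))) :
    ∀ pending out pre, altGo all pending out pre = out ++ filtF all pending pre := by
  intro pending
  induction pending with
  | nil => intro out pre; simp [altGo, filtF]
  | cons e rest ih =>
    intro out pre
    simp only [altGo, filtF]
    rw [ih]
    by_cases hc : (all.any (fun o => leB o e && !leB e o) || pre.any (fun o => leB o e && leB e o)) = true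
    · simp [hc]
    · simp only [Bool.not_eq_true] at hc
      simp [hc]

lemma filtF_subset {all : List (List (List Int))} {x : List (List Int)} :
    ∀ {pending pre : List (List (List Int))}, x ∈ filtF all pending pre → x ∈ pending := by
  intro pending
  induction pending with
  | nil => intro pre h; simp [filtF] at h
  | cons e rest ih =>
    intro pre h
    simp only [filtF, List.mem_append] at h
    rcases h with h | h
    · split at h
      · simp at h
      · simp only [List.mem_singleton] at h; subst h; exact List.mem_cons_self ..
    · exact List.mem_cons_of_mem _ (ih h)

lemma filtF_no_dom {all : List (List (List Int))} {x : List (List Int)} :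
    ∀ {pending pre : List (List (List Int))}, x ∈ filtF all pending pre →
      all.any (fun o => leB o x && !leB x o) = false := by
  intro pending
  induction pending with
  | nil => intro pre h; simp [filtF] at h
  | cons e rest ih =>
    intro pre h
    simp only [filtF, List.mem_append] at h
    rcases h with h | h
    · split at h
      · simp at h
      · rename_i hc
        simp only [List.mem_singleton] at h; subst h
        simp only [Bool.or_eq_true, not_or, Bool.not_eq_true] at hc
        exact hc.1
    · exact ih h

lemma filtF_no_dup {all : List (List (List Int))} {x : List (List Int)} :
    ∀ {pending pre : List (List (List Int))}, x ∈ filtF all pending pre →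
      pre.any (fun o => leB o x && leB x o) = false := by
  intro pending
  induction pending with
  | nil => intro pre h; simp [filtF] at h
  | cons e rest ih =>
    intro pre h
    simp only [filtF, List.mem_append] at h
    rcases h with h | h
    · split at h
      · simp at h
      · rename_i hc
        simp only [List.mem_singleton] at h; subst h
        simp only [Bool.or_eq_true, not_or, Bool.not_eq_true] at hc
        exact hc.2
    · have := ih h
      simp only [List.any_append, Bool.or_eq_false_iff] at this
      exact this.1

lemma filtF_pairwise :
    ∀ (pending pre : List (List (List Int))),
      (filtF (pre ++ pending) pending pre).Pairwise (fun x y => leB x y = false ∧ leB y x = false) := by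
  intro pending
  induction pending with
  | nil => intro pre; simp [filtF]
  | cons e rest ih =>
    intro pre
    have hall : pre ++ e :: rest = (pre ++ [e]) ++ rest := by simp
    have htail := ih (pre ++ [e])
    rw [← hall] at htail
    simp only [filtF]
    split
    · simpa using htail
    · rename_i hc
      simp only [Bool.or_eq_true, not_or, Bool.not_eq_true] at hc
      simp only [List.singleton_append, List.pairwise_cons]
      refine ⟨?_, htail⟩
      intro y hy
      have hyrest : y ∈ rest := filtF_subset hy
      have hymem : y ∈ pre ++ e :: rest := by simp [hyrest]
      have hemem : e ∈ pre ++ e :: rest := by simp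
      have hdom_y := filtF_no_dom hy
      have hdup_y := filtF_no_dup hy
      simp only [List.any_eq_false, Bool.and_eq_true, not_and] at hdom_y hdup_y hc
      have hye : leB y e = false := by
        by_contra hne
        simp only [Bool.not_eq_false] at hne
        by_cases hey : leB e y = true
        · exact absurd hne (by simpa [hey] using hdup_y e (by simp))
        · have := hc.1 y hymem
          simp only [hne, Bool.not_eq_true'] at this
          exact hey (by simpa using this)
      constructor
      · by_contra hne
        simp only [Bool.not_eq_false] at hne
        have := hdom_y e hemem
        simp [hne, hye] at this
      · exact hye

lemma Fp_pairwise (seen : List (List (List Int))) :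
    (Fp seen).Pairwise (fun x y => leB x y = false ∧ leB y x = false) := by
  have := filtF_pairwise seen []
  simpa [Fp] using this

lemma Fp_le_eq {seen : List (List (List Int))} {p x : List (List Int)} (hp : p ∈ Fp seen) (hx : x ∈ Fp seen)
    (h : leB p x = true) : p = x := by
  by_contra hne
  have hsym : Symmetric (fun x y : List (List Int) => leB x y = false ∧ leB y x = false) :=
    fun a b hab => ⟨hab.2, hab.1⟩
  have := (Fp_pairwise seen).forall hsym hp hx hne
  rw [this.1] at h
  exact Bool.false_ne_true h

lemma Fp_nodup (seen : List (List (List Int))) : (Fp seen).Nodup := by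
  refine (Fp_pairwise seen).imp ?_
  intro a b hab hEq
  subst hEq
  rw [leB_refl] at hab
  simpa using hab.1

lemma Fp_subset {seen : List (List (List Int))} {x : List (List Int)} (hx : x ∈ Fp seen) : x ∈ seen := by
  exact filtF_subset hx

lemma filtF_snocAll (all : List (List (List Int))) (a : List (List Int)) :
    ∀ (pending pre : List (List (List Int))),
      filtF (all ++ [a]) pending pre
        = (filtF all pending pre).filter (fun x => !(leB a x && !leB x a)) := by
  intro pending
  induction pending with
  | nil => intro pre; simp [filtF]
  | cons e rest ih =>
    intro pre
    simp only [filtF, List.any_append, List.any_cons, List.any_nil, Bool.or_false,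
      List.filter_append, ih]
    by_cases hd : (all.any (fun o => leB o e && !leB e o) || pre.any (fun o => leB o e && leB e o)) = true
    · rcases Bool.or_eq_true_iff.mp hd with h | h <;> simp [h]
    · simp only [Bool.or_eq_true, not_or, Bool.not_eq_true] at hd
      by_cases hs : (leB a e && !leB e a) = true
      · simp only [Bool.and_eq_true, Bool.not_eq_true'] at hs
        simp [hd.1, hd.2, hs.1, hs.2]
      · simp only [Bool.not_eq_true] at hs
        simp only [hd.1, hd.2, Bool.false_or, hs, if_neg Bool.false_ne_true,
          List.singleton_append, List.filter_cons]
        simp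

lemma filtF_snocPending (A : List (List (List Int))) (a : List (List Int)) :
    ∀ (pending pre : List (List (List Int))),
      filtF A (pending ++ [a]) pre
        = filtF A pending pre ++
          (if A.any (fun o => leB o a && !leB a o) || (pre ++ pending).any (fun o => leB o a && leB a o)
           then [] else [a]) := by
  intro pending
  induction pending with
  | nil => intro pre; simp [filtF]
  | cons e rest ih =>
    intro pre
    simp only [List.cons_append, filtF, ih (pre ++ [e]), List.append_assoc, List.nil_append]

lemma scanPrime_eq (e : List (List Int)) :
    ∀ (prime : List (List (List Int))),
      prime.Pairwise (fun x y => leB x y = false ∧ leB y x = false) →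
      ∀ val, scanPrime e prime val
        = if prime.any (fun p => leB p e) then (false, val)
          else (true, val ++ prime.filter (fun p => leB e p)) := by
  intro prime
  induction prime with
  | nil => intro _ val; simp [scanPrime]
  | cons p ps ih =>
    intro hpw val
    rw [List.pairwise_cons] at hpw
    simp only [scanPrime, check_small_eq, List.any_cons]
    by_cases hpe : leB p e = true
    · simp [hpe]
    · simp only [Bool.not_eq_true] at hpe
      by_cases hep : leB e p = true
      · have hh : ps.any (fun q => leB q e) = false := by
          simp only [List.any_eq_false]
          intro q hq hqe
          have := leB_trans hqe hep
          rw [(hpw.1 q hq).2] at this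
          simp at this
        simp only [hpe, hep]
        rw [ih hpw.2 (val ++ [p])]
        simp [hh, hep]
      · simp only [Bool.not_eq_true] at hep
        simp only [hpe, hep]
        rw [ih hpw.2 val]
        simp [hep]

lemma foldl_removeFirst_cons {x : List (List Int)} {vs : List (List (List Int))}
    (h : ∀ v ∈ vs, v ≠ x) (m : List (List (List Int))) :
    vs.foldl removeFirst (x :: m) = x :: vs.foldl removeFirst m := by
  induction vs generalizing m with
  | nil => rfl
  | cons v vs ih =>
    simp only [List.foldl_cons]
    have hxv : x ≠ v := fun hEq => h v (List.mem_cons_self ..) hEq.symm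
    rw [show removeFirst (x :: m) v = x :: removeFirst m v by simp [removeFirst, hxv]]
    exact ih (fun w hw => h w (List.mem_cons_of_mem _ hw)) _

lemma foldl_remove_filter :
    ∀ (l : List (List (List Int))) (tail : List (List (List Int))) (p : List (List Int) → Bool),
      l.Nodup → (∀ x ∈ l, p x = true → x ∉ tail) →
      (l.filter p).foldl removeFirst (l ++ tail) = l.filter (fun x => !p x) ++ tail := by
  intro l
  induction l with
  | nil => intro tail p _ _; simp
  | cons x xs ih =>
    intro tail p hnd hp
    rw [List.nodup_cons] at hnd
    by_cases hx : p x = true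
    · rw [List.filter_cons_of_pos hx]
      simp only [List.cons_append, List.foldl_cons]
      rw [show removeFirst (x :: (xs ++ tail)) x = xs ++ tail by simp [removeFirst]]
      rw [ih tail p hnd.2 (fun y hy hpy => hp y (List.mem_cons_of_mem _ hy) hpy)]
      rw [List.filter_cons_of_neg (by simp [hx])]
    · simp only [Bool.not_eq_true] at hx
      rw [List.filter_cons_of_neg (by simp [hx])]
      simp only [List.cons_append]
      rw [foldl_removeFirst_cons]
      · rw [ih tail p hnd.2 (fun y hy hpy => hp y (List.mem_cons_of_mem _ hy) hpy)]
        rw [List.filter_cons_of_pos (by simp [hx])]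
        rfl
      · intro v hv
        have := List.mem_of_mem_filter hv
        exact fun hEq => hnd.1 (hEq ▸ this)

lemma any_le_split (seen : List (List (List Int))) (e : List (List Int)) :
    (seen.any (fun o => leB o e && !leB e o) || seen.any (fun o => leB o e && leB e o))
      = seen.any (fun o => leB o e) := by
  induction seen with
  | nil => rfl
  | cons o os ih =>
    simp only [List.any_cons]
    cases hl : leB o e
    · simpa [hl] using ih
    · cases hm : leB e o <;> simp

lemma dominates_any {seen : List (List (List Int))} {e : List (List Int)} (hD : Dominates seen) :
    (Fp seen).any (fun p => leB p e) = seen.any (fun o => leB o e) := by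
  cases hA : (Fp seen).any (fun p => leB p e) with
  | true =>
    obtain ⟨p, hp, hpe⟩ := List.any_eq_true.mp hA
    exact (List.any_eq_true.mpr ⟨p, Fp_subset hp, hpe⟩).symm
  | false =>
    cases hB : seen.any (fun o => leB o e) with
    | true =>
      obtain ⟨o, ho, hoe⟩ := List.any_eq_true.mp hB
      obtain ⟨p, hp, hpo⟩ := hD o ho
      have : (Fp seen).any (fun p => leB p e) = true :=
        List.any_eq_true.mpr ⟨p, hp, leB_trans hpo hoe⟩
      rw [hA] at this
      exact absurd this (by simp)
    | false => rfl

lemma Fp_step {seen : List (List (List Int))} {e : List (List Int)} (hD : Dominates seen) :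
    Fp (seen ++ [e])
      = if seen.any (fun o => leB o e) then Fp seen
        else (Fp seen).filter (fun p => !leB e p) ++ [e] := by
  have h1 : Fp (seen ++ [e])
      = (Fp seen).filter (fun x => !(leB e x && !leB x e)) ++
        (if seen.any (fun o => leB o e) then [] else [e]) := by
    show filtF (seen ++ [e]) (seen ++ [e]) [] = _
    rw [filtF_snocPending (seen ++ [e]) e seen [], filtF_snocAll seen e seen []]
    have hcond : ((seen ++ [e]).any (fun o => leB o e && !leB e o)
        || ([] ++ seen).any (fun o => leB o e && leB e o)) = seen.any (fun o => leB o e) := by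
      simp only [List.any_append, List.any_cons, List.any_nil, List.nil_append]
      rw [leB_refl]
      simp only [Bool.not_true, Bool.and_false, Bool.or_false]
      exact any_le_split seen e
    rw [hcond]
    rfl
  rw [h1]
  by_cases h : seen.any (fun o => leB o e) = true
  · rw [if_pos h, if_pos h, List.append_nil]
    apply List.filter_eq_self.mpr
    intro x hx
    obtain ⟨o, ho, hoe⟩ := List.any_eq_true.mp h
    obtain ⟨p, hp, hpo⟩ := hD o ho
    have hpe : leB p e = true := leB_trans hpo hoe
    by_cases hex : leB e x = true
    · have hpx : leB p x = true := leB_trans hpe hex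
      have := Fp_le_eq hp hx hpx
      subst this
      simp [hex, hpe]
    · simp only [Bool.not_eq_true] at hex
      simp [hex]
  · simp only [Bool.not_eq_true] at h
    rw [if_neg (by simp [h]), if_neg (by simp [h])]
    congr 1
    apply List.filter_congr
    intro x hx
    have hxe : leB x e = false := by
      cases hxe : leB x e
      · rfl
      · have : seen.any (fun o => leB o e) = true :=
          List.any_eq_true.mpr ⟨x, Fp_subset hx, hxe⟩
        rw [h] at this
        exact absurd this (by simp)
    simp [hxe]

lemma dominates_snoc {seen : List (List (List Int))} {e : List (List Int)} (hD : Dominates seen) :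
    Dominates (seen ++ [e]) := by
  intro s hs
  rw [Fp_step hD]
  rcases List.mem_append.mp hs with hs | hs
  · by_cases h : seen.any (fun o => leB o e) = true
    · rw [if_pos h]
      exact hD s hs
    · simp only [Bool.not_eq_true] at h
      rw [if_neg (by simp [h])]
      obtain ⟨p, hp, hps⟩ := hD s hs
      by_cases hep : leB e p = true
      · exact ⟨e, by simp, leB_trans hep hps⟩
      · refine ⟨p, List.mem_append_left _ ?_, hps⟩
        simp only [List.mem_filter]
        simp only [Bool.not_eq_true] at hep
        exact ⟨hp, by simp [hep]⟩
  · simp only [List.mem_singleton] at hs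
    subst hs
    by_cases h : seen.any (fun o => leB o s) = true
    · rw [if_pos h]
      obtain ⟨o, ho, hos⟩ := List.any_eq_true.mp h
      obtain ⟨p, hp, hpo⟩ := hD o ho
      exact ⟨p, hp, leB_trans hpo hos⟩
    · simp only [Bool.not_eq_true] at h
      rw [if_neg (by simp [h])]
      exact ⟨s, by simp, leB_refl s⟩

lemma main_loop :
    ∀ (pending seen : List (List (List Int))), Dominates seen →
      simLoop pending (Fp seen) = Fp (seen ++ pending) := by
  intro pending
  induction pending with
  | nil => intro seen _; simp [simLoop]
  | cons e rest ih =>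
    intro seen hD
    have hassoc : seen ++ e :: rest = (seen ++ [e]) ++ rest := by simp
    simp only [simLoop]
    rw [scanPrime_eq e (Fp seen) (Fp_pairwise seen) [], dominates_any hD]
    by_cases h : seen.any (fun o => leB o e) = true
    · rw [if_pos h]
      have hstep : Fp (seen ++ [e]) = Fp seen := by rw [Fp_step hD, if_pos h]
      have := ih (seen ++ [e]) (dominates_snoc hD)
      rw [hstep, ← hassoc] at this
      simpa using this
    · simp only [Bool.not_eq_true] at h
      have hne : ¬ ((seen.any fun o => leB o e) = true) := by rw [h]; simp
      rw [if_neg hne]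
      have hR : ((Fp seen).filter (fun p => leB e p)).foldl removeFirst (Fp seen ++ [e])
          = (Fp seen).filter (fun p => !leB e p) ++ [e] := by
        apply foldl_remove_filter (Fp seen) [e] _ (Fp_nodup seen)
        intro x hx hex hmem
        simp only [List.mem_singleton] at hmem
        subst hmem
        have : seen.any (fun o => leB o x) = true :=
          List.any_eq_true.mpr ⟨x, Fp_subset hx, leB_refl x⟩
        rw [h] at this
        exact absurd this (by simp)
      have hstep : Fp (seen ++ [e]) = (Fp seen).filter (fun p => !leB e p) ++ [e] := by
        rw [Fp_step hD, if_neg (by simp [h])]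
      have := ih (seen ++ [e]) (dominates_snoc hD)
      rw [hstep, ← hassoc] at this
      simpa [hR] using this

-- ===== VERDICT (by name: the statement is the Claim_ definition above) =====
theorem sim_disset_spec : Claim_equal_sim_disset := by
  intro disset _
  unfold Spec_sim_disset sim_disset_alt
  rw [altGo_out]
  cases disset with
  | nil => rfl
  | cons d0 rest =>
    have hFp1 : Fp [d0] = [d0] := by
      simp [Fp, filtF, leB_refl]
    have hD : Dominates [d0] := by
      intro s hs
      simp only [List.mem_singleton] at hs
      subst hs
      exact ⟨s, by rw [hFp1]; simp, leB_refl s⟩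
    have := main_loop rest [d0] hD
    rw [hFp1] at this
    show simLoop rest [d0] = [] ++ filtF (d0 :: rest) (d0 :: rest) []
    rw [this]
    rfl
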